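-- pv_equiv track=rewrite | github.com/Shrey-Sheladia/Schedule | Utils.py | sort_rooms
-- ===== SOURCE A (Python) =====
-- def sort_rooms(rooms):
--     numeric_rooms = []
--     non_numeric_rooms = []
--     for room in rooms:
--         if room.isnumeric():
--             numeric_rooms.append(int(room))
--         else:
--             non_numeric_rooms.append(room)
--     sorted_numeric_rooms = sorted(numeric_rooms)
--     sorted_rooms = non_numeric_rooms + [str(room) for room in sorted_numeric_rooms]
--     return sorted_rooms
-- ===== SOURCE B (Python) =====
-- def sort_rooms(rooms):
--     # One stable sort of the whole list: non-numeric rooms keep their original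
--     # order and come first (key (0, 0)), numeric rooms follow ordered by value
--     # (key (1, int(r))); then normalise numeric entries to str(int(r)).
--     ordered = sorted(rooms, key=lambda r: (1, int(r)) if r.isnumeric() else (0, 0))
--     return [str(int(r)) if r.isnumeric() else r for r in ordered]
-- ===== Notes on version B (the rewrite author's own statement) =====
-- stated objective: alternative
-- what changed: Replaces the explicit partition into two lists plus a sort of the numeric half with a single stable sort of the whole input under a tuple key ((0,0) for non-numeric, (1,int(r)) for numeric) followed by one normalising pass.
import Mathlib
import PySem

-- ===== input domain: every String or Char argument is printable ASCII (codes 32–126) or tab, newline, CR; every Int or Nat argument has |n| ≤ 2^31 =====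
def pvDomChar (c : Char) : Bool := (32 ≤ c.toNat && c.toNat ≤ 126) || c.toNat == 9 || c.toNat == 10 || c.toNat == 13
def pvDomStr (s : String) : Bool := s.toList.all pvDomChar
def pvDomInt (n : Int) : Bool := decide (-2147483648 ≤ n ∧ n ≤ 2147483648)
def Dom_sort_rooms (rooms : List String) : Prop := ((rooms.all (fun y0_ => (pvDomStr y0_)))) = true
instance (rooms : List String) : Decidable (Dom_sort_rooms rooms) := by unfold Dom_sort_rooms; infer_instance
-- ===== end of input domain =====

-- B replaces A's partition-then-sort with one stable sort of the whole list under a tuple key, followed by a normalising pass (alternative decomposition, same cost).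

-- room.isnumeric(): on the ASCII domain isnumeric coincides with str.isdigit (nonempty, all chars '0'-'9'), which is PySem.Str.strIsdigit
def pvIsNum (room : String) : Bool := PySem.Str.strIsdigit room
-- int(room): on a strIsdigit-true string int() never raises, so the getD 0 default is unreachable
def pvIntVal (room : String) : Int := (PySem.Int.ofStr? room).getD 0

-- ===== PORT A =====
def sort_rooms (rooms : List String) : List String :=
  -- one loop appending each room to numeric_rooms (as int) or non_numeric_rooms
  let parts := rooms.foldl
    (fun (st : List Int × List String) room =>
      if pvIsNum room then (st.1 ++ [pvIntVal room], st.2)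
      else (st.1, st.2 ++ [room]))
    ([], [])
  let sorted_numeric_rooms := PySem.List.sorted parts.1 (fun x => x)
  parts.2 ++ sorted_numeric_rooms.map PySem.Int.toStr

-- ===== PORT B =====
-- the tuple key: (1, int(r)) if r.isnumeric() else (0, 0)
def pvKey1 (room : String) : Int := if pvIsNum room then 1 else 0
def pvKey2 (room : String) : Int := if pvIsNum room then pvIntVal room else 0

def sort_rooms_alt (rooms : List String) : List String :=
  (PySem.List.sorted2 rooms pvKey1 pvKey2).map
    (fun r => if pvIsNum r then PySem.Int.toStr (pvIntVal r) else r)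

-- ===== PRECONDITION & SPEC =====
def Spec_sort_rooms (rooms : List String) (out : List String) : Prop := out = sort_rooms_alt rooms
instance (rooms : List String) (out : List String) : Decidable (Spec_sort_rooms rooms out) := by unfold Spec_sort_rooms; infer_instance

-- ===== CLAIM (what is proved, stated in full; the proofs are below) =====
def Claim_equal_sort_rooms : Prop := ∀ (rooms : List String), Dom_sort_rooms rooms → Spec_sort_rooms rooms (sort_rooms rooms)

-- ===== LEMMAS AND PROOFS =====

-- insertBy passes over a prefix it is not inserted into
lemma insertBy_skip_prefix {α : Type} (before : α → α → Bool) (x : α) (N S : List α)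
    (h : ∀ n ∈ N, before x n = false) :
    PySem.List.insertBy before x (N ++ S) = N ++ PySem.List.insertBy before x S := by
  induction N with
  | nil => rfl
  | cons n N ih =>
      simp only [List.cons_append, PySem.List.insertBy, h n (by simp)]
      simp only [Bool.false_eq_true, if_false, List.cons.injEq, true_and]
      exact ih (fun m hm => h m (by simp [hm]))

-- insertBy puts x in front when it goes before everything
lemma insertBy_front {α : Type} (before : α → α → Bool) (x : α) (S : List α)
    (h : ∀ s ∈ S, before x s = true) :
    PySem.List.insertBy before x S = x :: S := by
  cases S with
  | nil => rfl
  | cons s S => simp [PySem.List.insertBy, h s (by simp)]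

-- insertBy only compares x against members of the list
lemma insertBy_congr {α : Type} (before before' : α → α → Bool) (x : α) (S : List α)
    (h : ∀ s ∈ S, before x s = before' x s) :
    PySem.List.insertBy before x S = PySem.List.insertBy before' x S := by
  induction S with
  | nil => rfl
  | cons s S ih =>
      simp only [PySem.List.insertBy, h s (by simp)]
      rw [ih (fun m hm => h m (by simp [hm]))]

-- the comparison used by sorted2 with keys pvKey1/pvKey2
def pvLt (a b : String) : Bool :=
  decide (pvKey1 a < pvKey1 b) || (!decide (pvKey1 b < pvKey1 a) && decide (pvKey2 a < pvKey2 b))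

-- a stable insertion sort under pvLt keeps non-numeric rooms (key1 = 0) in order in
-- front and maintains the numeric rooms as an insertion sort under key2 behind them
lemma partition_fold (xs : List String) (N S : List String)
    (hN : ∀ n ∈ N, pvIsNum n = false) (hS : ∀ s ∈ S, pvIsNum s = true) :
    xs.foldl (fun acc x => PySem.List.insertBy pvLt x acc) (N ++ S)
    = (N ++ xs.filter (fun r => !pvIsNum r)) ++
      (xs.filter (fun r => pvIsNum r)).foldl
        (fun acc x => PySem.List.insertBy (fun a b => decide (pvKey2 a < pvKey2 b)) x acc) S := by
  induction xs generalizing N S with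
  | nil => simp
  | cons x xs ih =>
      by_cases hx : pvIsNum x = true
      · have hstep : PySem.List.insertBy pvLt x (N ++ S)
            = N ++ PySem.List.insertBy (fun a b => decide (pvKey2 a < pvKey2 b)) x S := by
          rw [insertBy_skip_prefix pvLt x N S
              (fun n hn => by simp [pvLt, pvKey1, pvKey2, hx, hN n hn])]
          rw [insertBy_congr pvLt (fun a b => decide (pvKey2 a < pvKey2 b)) x S
              (fun s hs => by simp [pvLt, pvKey1, hx, hS s hs])]
        rw [List.foldl_cons, hstep,
            ih N _ hN (fun s hs => by
              rcases (PySem.List.mem_insertBy _ x s S).mp hs with h | h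
              · exact h ▸ hx
              · exact hS s h)]
        simp [hx]
      · have hx' : pvIsNum x = false := by simpa using hx
        have hstep : PySem.List.insertBy pvLt x (N ++ S) = (N ++ [x]) ++ S := by
          rw [insertBy_skip_prefix pvLt x N S
              (fun n hn => by simp [pvLt, pvKey1, pvKey2, hx', hN n hn])]
          rw [insertBy_front pvLt x S
              (fun s hs => by simp [pvLt, pvKey1, hx', hS s hs])]
          simp
        rw [List.foldl_cons, hstep,
            ih (N ++ [x]) S
              (fun n hn => by
                rcases List.mem_append.mp hn with h | h
                · exact hN n h
                · simpa using (List.mem_singleton.mp h) ▸ hx')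
              hS]
        simp [hx']

-- sorted2 under the tuple key = non-numeric rooms in order ++ numeric rooms sorted by key2
lemma sorted2_partition (xs : List String) :
    PySem.List.sorted2 xs pvKey1 pvKey2
    = xs.filter (fun r => !pvIsNum r)
      ++ PySem.List.sorted (xs.filter (fun r => pvIsNum r)) pvKey2 := by
  have h := partition_fold xs [] [] (by simp) (by simp)
  simp only [List.nil_append] at h
  rw [PySem.List.sorted_eq_foldl_insertBy]
  exact h

-- A's loop appends the int values of numeric rooms and the non-numeric rooms, in order
lemma a_fold (xs : List String) (a : List Int) (b : List String) :
    xs.foldl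
      (fun (st : List Int × List String) room =>
        if pvIsNum room then (st.1 ++ [pvIntVal room], st.2)
        else (st.1, st.2 ++ [room])) (a, b)
    = (a ++ (xs.filter (fun r => pvIsNum r)).map pvIntVal,
       b ++ xs.filter (fun r => !pvIsNum r)) := by
  induction xs generalizing a b with
  | nil => simp
  | cons x xs ih =>
      by_cases hx : pvIsNum x = true
      · rw [List.foldl_cons]; simp only [hx, if_true]; rw [ih]; simp [hx]
      · have hx' : pvIsNum x = false := by simpa using hx
        rw [List.foldl_cons]; simp only [hx', Bool.false_eq_true, if_false]
        rw [ih]; simp [hx']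

-- sorting numeric strings by their int value, then taking the values, is sorting the values
lemma map_intval_sorted (F : List String) (hF : ∀ r ∈ F, pvIsNum r = true) :
    (PySem.List.sorted F pvKey2).map pvIntVal
    = PySem.List.sorted (F.map pvIntVal) (fun x => x) := by
  apply PySem.List.eq_of_perm_of_pairwise_le_of_injective (fun x : Int => x)
      (fun _ _ h => h)
  · exact ((PySem.List.sorted_perm F pvKey2 false).map pvIntVal).trans
      (PySem.List.sorted_perm (F.map pvIntVal) (fun x => x) false).symm
  · rw [List.pairwise_map]
    refine (PySem.List.sorted_pairwise F pvKey2).imp_of_mem ?_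
    intro a b ha hb hab
    have ha' := hF a ((PySem.List.mem_sorted F pvKey2 false a).mp ha)
    have hb' := hF b ((PySem.List.mem_sorted F pvKey2 false b).mp hb)
    simpa [pvKey2, ha', hb'] using hab
  · exact PySem.List.sorted_pairwise (F.map pvIntVal) (fun x => x)

-- ===== VERDICT (by name: the statement is the Claim_ definition above) =====
theorem sort_rooms_spec : Claim_equal_sort_rooms := by
  intro rooms _
  show sort_rooms rooms = sort_rooms_alt rooms
  have hb : sort_rooms_alt rooms
      = (PySem.List.sorted2 rooms pvKey1 pvKey2).map
          (fun r => if pvIsNum r then PySem.Int.toStr (pvIntVal r) else r) := rfl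
  rw [hb, sorted2_partition, List.map_append]
  have h1 : (rooms.filter (fun r => !pvIsNum r)).map
      (fun r => if pvIsNum r then PySem.Int.toStr (pvIntVal r) else r)
      = rooms.filter (fun r => !pvIsNum r) := by
    have := List.map_congr_left
        (f := fun r => if pvIsNum r then PySem.Int.toStr (pvIntVal r) else r)
        (g := id) (l := rooms.filter (fun r => !pvIsNum r))
        (fun r hr => by
          have : pvIsNum r = false := by simpa using (List.mem_filter.mp hr).2
          simp [this])
    simpa using this
  have h2 : (PySem.List.sorted (rooms.filter (fun r => pvIsNum r)) pvKey2).map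
      (fun r => if pvIsNum r then PySem.Int.toStr (pvIntVal r) else r)
      = ((PySem.List.sorted (rooms.filter (fun r => pvIsNum r)) pvKey2).map pvIntVal).map
          PySem.Int.toStr := by
    rw [List.map_map]
    apply List.map_congr_left
    intro r hr
    have : pvIsNum r = true :=
      (List.mem_filter.mp ((PySem.List.mem_sorted _ pvKey2 false r).mp hr)).2
    simp [this]
  rw [h1, h2, map_intval_sorted _ (fun r hr => (List.mem_filter.mp hr).2)]
  show sort_rooms rooms = _
  unfold sort_rooms
  rw [a_fold rooms [] []]
  simp
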